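-- pv_equiv track=rewrite | github.com/TakaIshikawa/blueprint | src/blueprint/task_bulk_operation_safety.py | _required_safeguards
-- ===== SOURCE A (Python) =====
-- from typing import Any, Iterable, Literal, Mapping, TypeVar
--
-- BulkOperationType = Literal[
--     "bulk_edit",
--     "batch_import",
--     "mass_notification",
--     "backfill",
--     "migration",
--     "wide_fanout_write",
-- ]
--
-- BulkOperationSafeguard = Literal[
--     "dry_run",
--     "batching",
--     "sampling",
--     "rate_limiting",
--     "rollback",
--     "operator_approval",
--     "progress_monitoring",
-- ]
--
-- _SAFEGUARD_ORDER: tuple[BulkOperationSafeguard, ...] = (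
--     "dry_run",
--     "batching",
--     "sampling",
--     "rate_limiting",
--     "rollback",
--     "operator_approval",
--     "progress_monitoring",
-- )
--
-- def _required_safeguards(
--     operations: tuple[BulkOperationType, ...],
-- ) -> tuple[BulkOperationSafeguard, ...]:
--     if not operations:
--         return ()
--     required: set[BulkOperationSafeguard] = {"dry_run", "batching", "rollback", "progress_monitoring"}
--     if "mass_notification" in operations or "wide_fanout_write" in operations:
--         required.update({"sampling", "rate_limiting", "operator_approval"})
--     if "batch_import" in operations or "backfill" in operations or "migration" in operations:
--         required.update({"sampling", "rate_limiting"})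
--     if "bulk_edit" in operations:
--         required.add("operator_approval")
--     return tuple(safeguard for safeguard in _SAFEGUARD_ORDER if safeguard in required)
-- ===== SOURCE B (Python) =====
-- _SAFEGUARD_ORDER = (
--     "dry_run",
--     "batching",
--     "sampling",
--     "rate_limiting",
--     "rollback",
--     "operator_approval",
--     "progress_monitoring",
-- )
--
-- _BASE = frozenset({"dry_run", "batching", "rollback", "progress_monitoring"})
--
--
-- def _implied(op):
--     """Full safeguard set implied by a single operation type (base four plus its specifics)."""
--     if op in ("mass_notification", "wide_fanout_write"):
--         return _BASE | {"sampling", "rate_limiting", "operator_approval"}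
--     if op in ("batch_import", "backfill", "migration"):
--         return _BASE | {"sampling", "rate_limiting"}
--     if op == "bulk_edit":
--         return _BASE | {"operator_approval"}
--     return _BASE
--
--
-- def _required_safeguards(operations):
--     if not operations:
--         return ()
--     required = frozenset()
--     for op in operations:
--         required |= _implied(op)
--     return tuple(s for s in _SAFEGUARD_ORDER if s in required)
-- ===== Notes on version B (the rewrite author's own statement) =====
-- stated objective: alternative
-- what changed: Replaces A's global membership tests over the whole tuple (three 'in' scans seeding one shared set) by a per-operation mapping: each operation type maps to its full implied-safeguard set and a single pass unions them, then the same ordered filter is applied.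
import Mathlib
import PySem

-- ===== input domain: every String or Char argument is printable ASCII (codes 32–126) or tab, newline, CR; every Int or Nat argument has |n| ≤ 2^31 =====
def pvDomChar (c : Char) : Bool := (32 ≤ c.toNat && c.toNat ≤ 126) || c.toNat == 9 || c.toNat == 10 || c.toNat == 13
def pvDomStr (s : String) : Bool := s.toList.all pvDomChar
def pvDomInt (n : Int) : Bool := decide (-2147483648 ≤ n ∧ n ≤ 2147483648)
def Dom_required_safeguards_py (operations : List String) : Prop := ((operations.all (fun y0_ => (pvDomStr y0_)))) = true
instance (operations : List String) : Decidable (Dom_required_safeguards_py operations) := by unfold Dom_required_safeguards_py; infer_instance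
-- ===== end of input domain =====

-- B replaces A's three whole-list membership scans over one shared set by a per-operation
-- implied-safeguard mapping unioned in a single pass (alternative decomposition, same cost).


-- ===== PORT A =====
def safeguardOrder : List String :=
  ["dry_run", "batching", "sampling", "rate_limiting", "rollback", "operator_approval", "progress_monitoring"]

def required_safeguards_py (operations : List String) : List String :=
  if operations = [] then []
  else
    let required : PySem.Set String :=
      PySem.Set.ofList ["dry_run", "batching", "rollback", "progress_monitoring"]
    let required :=
      if operations.contains "mass_notification" || operations.contains "wide_fanout_write" then
        PySem.Set.update required ["sampling", "rate_limiting", "operator_approval"]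
      else required
    let required :=
      if operations.contains "batch_import" || operations.contains "backfill" || operations.contains "migration" then
        PySem.Set.update required ["sampling", "rate_limiting"]
      else required
    let required :=
      if operations.contains "bulk_edit" then PySem.Set.add required "operator_approval"
      else required
    safeguardOrder.filter (fun s => PySem.Set.contains required s)

-- ===== PORT B =====
def impliedSafeguards (op : String) : PySem.Set String :=
  if op = "mass_notification" ∨ op = "wide_fanout_write" then
    PySem.Set.ofList ["dry_run", "batching", "rollback", "progress_monitoring",
                      "sampling", "rate_limiting", "operator_approval"]
  else if op = "batch_import" ∨ op = "backfill" ∨ op = "migration" then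
    PySem.Set.ofList ["dry_run", "batching", "rollback", "progress_monitoring",
                      "sampling", "rate_limiting"]
  else if op = "bulk_edit" then
    PySem.Set.ofList ["dry_run", "batching", "rollback", "progress_monitoring", "operator_approval"]
  else
    PySem.Set.ofList ["dry_run", "batching", "rollback", "progress_monitoring"]

def required_safeguards_py_alt (operations : List String) : List String :=
  if operations = [] then []
  else
    let required : PySem.Set String :=
      operations.foldl (fun acc op => PySem.Set.union acc (impliedSafeguards op)) PySem.Set.empty
    safeguardOrder.filter (fun s => PySem.Set.contains required s)

-- ===== PRECONDITION & SPEC =====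
def Spec_required_safeguards_py (operations : List String) (out : List String) : Prop := out = required_safeguards_py_alt operations
instance (operations : List String) (out : List String) : Decidable (Spec_required_safeguards_py operations out) := by unfold Spec_required_safeguards_py; infer_instance

-- ===== CLAIM (what is proved, stated in full; the proofs are below) =====
def Claim_equal_required_safeguards_py : Prop := ∀ (operations : List String), Dom_required_safeguards_py operations → Spec_required_safeguards_py operations (required_safeguards_py operations)

-- ===== LEMMAS AND PROOFS =====

-- membership in B's folded union = some operation implies the safeguard
theorem mem_fold_union (ops : List String) (init : PySem.Set String) (x : String) :
    x ∈ ops.foldl (fun acc op => PySem.Set.union acc (impliedSafeguards op)) init ↔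
      x ∈ init ∨ ∃ op ∈ ops, x ∈ impliedSafeguards op := by
  induction ops generalizing init with
  | nil => simp
  | cons o os ih =>
    simp only [List.foldl_cons, ih, PySem.Set.mem_union, List.mem_cons]
    constructor
    · rintro (⟨h | h⟩ | ⟨op, hop, h⟩)
      · exact Or.inl h
      · exact Or.inr ⟨o, Or.inl rfl, h⟩
      · exact Or.inr ⟨op, Or.inr hop, h⟩
    · rintro (h | ⟨op, rfl | hop, h⟩)
      · exact Or.inl (Or.inl h)
      · exact Or.inl (Or.inr h)
      · exact Or.inr ⟨op, hop, h⟩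

-- s ∈ impliedSafeguards op, characterised per safeguard
theorem implied_sampling (op : String) :
    "sampling" ∈ impliedSafeguards op ↔
      op = "mass_notification" ∨ op = "wide_fanout_write" ∨
      op = "batch_import" ∨ op = "backfill" ∨ op = "migration" := by
  unfold impliedSafeguards; split_ifs <;> simp_all [PySem.Set.mem_ofList]; tauto

theorem implied_rate (op : String) :
    "rate_limiting" ∈ impliedSafeguards op ↔
      op = "mass_notification" ∨ op = "wide_fanout_write" ∨
      op = "batch_import" ∨ op = "backfill" ∨ op = "migration" := by
  unfold impliedSafeguards; split_ifs <;> simp_all [PySem.Set.mem_ofList]; tauto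

theorem implied_approval (op : String) :
    "operator_approval" ∈ impliedSafeguards op ↔
      op = "mass_notification" ∨ op = "wide_fanout_write" ∨ op = "bulk_edit" := by
  unfold impliedSafeguards
  split_ifs with ha hb hc
  · simp only [PySem.Set.mem_ofList, List.mem_cons, List.not_mem_nil, String.reduceEq]
    tauto
  · simp only [PySem.Set.mem_ofList]
    rcases hb with rfl | rfl | rfl <;> simp
  · simp [PySem.Set.mem_ofList, hc]
  · simp only [PySem.Set.mem_ofList, List.mem_cons, List.not_mem_nil, String.reduceEq]
    tauto

theorem implied_dry (op : String) : "dry_run" ∈ impliedSafeguards op ↔ True := by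
  unfold impliedSafeguards; split_ifs <;> simp [PySem.Set.mem_ofList]

theorem implied_batching (op : String) : "batching" ∈ impliedSafeguards op ↔ True := by
  unfold impliedSafeguards; split_ifs <;> simp [PySem.Set.mem_ofList]

theorem implied_rollback (op : String) : "rollback" ∈ impliedSafeguards op ↔ True := by
  unfold impliedSafeguards; split_ifs <;> simp [PySem.Set.mem_ofList]

theorem implied_progress (op : String) : "progress_monitoring" ∈ impliedSafeguards op ↔ True := by
  unfold impliedSafeguards; split_ifs <;> simp [PySem.Set.mem_ofList]

-- ===== VERDICT (by name: the statement is the Claim_ definition above) =====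

theorem required_safeguards_py_spec : Claim_equal_required_safeguards_py := by
  intro ops _
  unfold Spec_required_safeguards_py required_safeguards_py required_safeguards_py_alt
  by_cases hne : ops = []
  · simp [hne]
  · simp only [hne, if_false]
    obtain ⟨o₀, hops⟩ := List.exists_mem_of_ne_nil ops hne
    apply List.filter_congr
    intro s hs
    rw [Bool.eq_iff_iff, PySem.Set.contains_iff, PySem.Set.contains_iff, mem_fold_union]
    simp only [PySem.Set.empty, List.not_mem_nil, false_or,
      List.contains_eq_mem, Bool.or_eq_true, decide_eq_true_eq]
    split_ifs with h1 h2 h3 <;>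
      fin_cases hs <;>
      simp only [PySem.Set.mem_update, PySem.Set.mem_add, PySem.Set.mem_ofList,
        List.mem_cons, List.not_mem_nil, or_false, false_or, String.reduceEq,
        implied_sampling, implied_rate, implied_approval,
        implied_dry, implied_batching, implied_rollback, implied_progress] <;>
      first
        | exact ⟨o₀, hops, trivial⟩
        | aesop
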